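-- pv_equiv track=rewrite | github.com/ParasharaRamesh/DSA-Prep | 53-String matching.py | knuthMorrisPrattAlgorithm
-- ===== SOURCE A (Python) =====
-- def calculateLengthOfLongestPrefixCumSuffix(word):
--     n = len(word)
--     i = 0
--     j = 1
--     matchingPrefixSuffixLength = 0
--
--     while j < n:
--         if word[i] == word[j]:
--             i += 1
--             matchingPrefixSuffixLength += 1
--         else:
--             i = 0
--             matchingPrefixSuffixLength = 0
--
--         j += 1
--
--     return matchingPrefixSuffixLength
--
-- def computePrefix(substring):
--     prefix = [0] * len(substring)
--
--     for i in range(1, len(substring)):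
--         prefix[i] = calculateLengthOfLongestPrefixCumSuffix(substring[:i+1])
--
--     return prefix
--
-- def knuthMorrisPrattAlgorithm(string, substring):
--     prefix = computePrefix(substring)
--     i = 0
--     j = 0
--     n = len(string)
--     m = len(substring)
--
--     while i < n:
--         while i < n and j < m and string[i] == substring[j]:
--             #keep moving together!
--             i += 1
--             j += 1
--
--         if j == m:
--             #match is found at index i - j
--             return True
--         elif j > 0:
--             #if at all some part of sub string was matched!
--             # reset j to point just after current longest prefix, i will stay the same
--             j = prefix[j-1]
--         else:
--             i += 1
--
--     return False
-- ===== SOURCE B (Python) =====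
-- def knuthMorrisPrattAlgorithm(string, substring):
--     if not substring:
--         return True
--     m = len(substring)
--     # same prefix values as A's table, computed in one linear pass carrying the run state
--     prefix = [0] * m
--     run = 0
--     for j in range(1, m):
--         if substring[run] == substring[j]:
--             run += 1
--         else:
--             run = 0
--         prefix[j] = run
--     # single pass over the text, one character at a time
--     j = 0
--     for c in string:
--         while j > 0 and c != substring[j]:
--             j = prefix[j - 1]
--         if c == substring[j]:
--             j += 1
--             if j == m:
--                 return True
--     return False
-- ===== Notes on version B (the rewrite author's own statement) =====
-- stated objective: faster
-- what changed: B computes the same prefix table in one linear pass carrying the run state (instead of re-running the quadratic helper on every slice) and scans the text with a single per-character KMP loop instead of A's nested while loops.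
-- intended difference: On the single input where both string and substring are empty, A returns False while B returns True, matching Python's '' in '' convention that the empty pattern occurs in every string. — e.g. on knuthMorrisPrattAlgorithm("", ""): A returns false, B returns true
import Mathlib
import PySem

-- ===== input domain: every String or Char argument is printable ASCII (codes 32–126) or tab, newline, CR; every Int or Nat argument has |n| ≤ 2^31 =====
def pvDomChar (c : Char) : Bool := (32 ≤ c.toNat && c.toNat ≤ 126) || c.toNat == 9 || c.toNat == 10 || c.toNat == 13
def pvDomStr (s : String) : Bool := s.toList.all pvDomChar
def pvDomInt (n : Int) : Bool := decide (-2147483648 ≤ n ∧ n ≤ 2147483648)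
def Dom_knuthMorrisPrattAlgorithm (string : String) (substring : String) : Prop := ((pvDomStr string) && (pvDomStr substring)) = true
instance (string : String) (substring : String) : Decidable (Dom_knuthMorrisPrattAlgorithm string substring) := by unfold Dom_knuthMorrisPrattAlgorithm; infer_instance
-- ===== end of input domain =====

-- B computes A's prefix table in one linear pass carrying the run state and scans the text with a
-- single per-character loop (asymptotically faster); on the single input ("","") B returns true
-- where A returns false (intended difference, see D_ below).


-- ===== PORT A =====

-- calculateLengthOfLongestPrefixCumSuffix: while j < n with state (i, matchingPrefixSuffixLength)
def pvHelpAStep (w : List Char) (st : Nat × Nat) (j : Nat) : Nat × Nat :=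
  if w.getD st.1 ' ' = w.getD j ' ' then (st.1 + 1, st.2 + 1) else (0, 0)

def pvHelpA (w : List Char) : Nat :=
  ((List.range' 1 (w.length - 1)).foldl (pvHelpAStep w) (0, 0)).2

-- computePrefix: prefix[i] = helper(substring[:i+1]) for i in range(1, len(substring))
def pvComputePrefixA (p : List Char) : List Nat :=
  (List.range' 1 (p.length - 1)).foldl
    (fun acc i => acc.set i (pvHelpA (p.take (i + 1))))
    (List.replicate p.length 0)

-- inner while: while i < n and j < m and string[i] == substring[j]
-- (fuel only makes the loop total; s.length - i steps always suffice, proved below)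
def pvInnerA (s p : List Char) : Nat → Nat → Nat → Nat × Nat
  | 0, i, j => (i, j)
  | fuel + 1, i, j =>
    if i < s.length ∧ j < p.length ∧ s.getD i ' ' = p.getD j ' ' then
      pvInnerA s p fuel (i + 1) (j + 1)
    else (i, j)

-- outer while of knuthMorrisPrattAlgorithm (fuel only makes the loop total)
def pvOuterA (s p : List Char) (pre : List Nat) : Nat → Nat → Nat → Bool
  | 0, _, _ => false
  | fuel + 1, i, j =>
    if i < s.length then
      let r := pvInnerA s p (s.length - i) i j
      if r.2 = p.length then true
      else if 0 < r.2 then pvOuterA s p pre fuel r.1 (pre.getD (r.2 - 1) 0)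
      else pvOuterA s p pre fuel (r.1 + 1) r.2
    else false

def knuthMorrisPrattAlgorithm (string : String) (substring : String) : Bool :=
  pvOuterA string.toList substring.toList (pvComputePrefixA substring.toList)
    ((string.toList.length + 1) * (substring.toList.length + 1)) 0 0

-- ===== PORT B =====

-- one-pass prefix table: run state carried along j = 1 .. m-1
def pvPrefBStep (p : List Char) (st : List Nat × Nat) (j : Nat) : List Nat × Nat :=
  let run := if p.getD st.2 ' ' = p.getD j ' ' then st.2 + 1 else 0
  (st.1.set j run, run)

def pvPrefB (p : List Char) : List Nat :=
  ((List.range' 1 (p.length - 1)).foldl (pvPrefBStep p) (List.replicate p.length 0, 0)).1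

-- while j > 0 and c != substring[j]: j = prefix[j-1]  (fuel only makes the loop total)
def pvFallB (p : List Char) (pre : List Nat) (c : Char) : Nat → Nat → Nat
  | 0, j => j
  | fuel + 1, j =>
    if 0 < j ∧ ¬ c = p.getD j ' ' then pvFallB p pre c fuel (pre.getD (j - 1) 0)
    else j

-- for c in string: fall back, then advance on match
def pvScanB (p : List Char) (pre : List Nat) : List Char → Nat → Bool
  | [], _ => false
  | c :: rest, j =>
    let j1 := pvFallB p pre c j j
    if c = p.getD j1 ' ' then
      if j1 + 1 = p.length then true else pvScanB p pre rest (j1 + 1)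
    else pvScanB p pre rest j1

def knuthMorrisPrattAlgorithm_alt (string : String) (substring : String) : Bool :=
  if substring.toList.isEmpty then true
  else pvScanB substring.toList (pvPrefB substring.toList) string.toList 0

-- ===== PRECONDITION & SPEC =====
-- On the single input where both string and substring are empty, A returns False while B returns
-- True, matching Python's '' in '' convention that the empty pattern occurs in every string.
def D_knuthMorrisPrattAlgorithm (string : String) (substring : String) : Prop :=
  string = "" ∧ substring = ""
instance (string : String) (substring : String) : Decidable (D_knuthMorrisPrattAlgorithm string substring) := by
  unfold D_knuthMorrisPrattAlgorithm; infer_instance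

def Spec_knuthMorrisPrattAlgorithm (string : String) (substring : String) (out : Bool) : Prop :=
  ¬ D_knuthMorrisPrattAlgorithm string substring → out = knuthMorrisPrattAlgorithm_alt string substring
instance (string : String) (substring : String) (out : Bool) : Decidable (Spec_knuthMorrisPrattAlgorithm string substring out) := by
  unfold Spec_knuthMorrisPrattAlgorithm; infer_instance

def pvDiffWitness_knuthMorrisPrattAlgorithm : String × String := ("", "")
def pvDiffWitnessOut_knuthMorrisPrattAlgorithm : Bool × Bool := (false, true)

-- ===== CLAIM (what is proved, stated in full; the proofs are below) =====
def Claim_unchanged_knuthMorrisPrattAlgorithm : Prop := ∀ (string : String) (substring : String), Dom_knuthMorrisPrattAlgorithm string substring → Spec_knuthMorrisPrattAlgorithm string substring (knuthMorrisPrattAlgorithm string substring)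
def Claim_changed_knuthMorrisPrattAlgorithm : Prop := Dom_knuthMorrisPrattAlgorithm (pvDiffWitness_knuthMorrisPrattAlgorithm.1) (pvDiffWitness_knuthMorrisPrattAlgorithm.2) ∧ D_knuthMorrisPrattAlgorithm (pvDiffWitness_knuthMorrisPrattAlgorithm.1) (pvDiffWitness_knuthMorrisPrattAlgorithm.2) ∧ knuthMorrisPrattAlgorithm (pvDiffWitness_knuthMorrisPrattAlgorithm.1) (pvDiffWitness_knuthMorrisPrattAlgorithm.2) = pvDiffWitnessOut_knuthMorrisPrattAlgorithm.1 ∧ knuthMorrisPrattAlgorithm_alt (pvDiffWitness_knuthMorrisPrattAlgorithm.1) (pvDiffWitness_knuthMorrisPrattAlgorithm.2) = pvDiffWitnessOut_knuthMorrisPrattAlgorithm.2 ∧ pvDiffWitnessOut_knuthMorrisPrattAlgorithm.1 ≠ pvDiffWitnessOut_knuthMorrisPrattAlgorithm.2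
def Claim_exact_knuthMorrisPrattAlgorithm : Prop := ∀ (string : String) (substring : String), Dom_knuthMorrisPrattAlgorithm string substring → D_knuthMorrisPrattAlgorithm string substring → knuthMorrisPrattAlgorithm string substring ≠ knuthMorrisPrattAlgorithm_alt string substring

-- ===== LEMMAS AND PROOFS =====

-- list-index helpers
theorem pv_getD_set (l : List Nat) (i k v : Nat) :
    (l.set i v).getD k 0 = if i = k ∧ i < l.length then v else l.getD k 0 := by
  simp only [List.getD_eq_getElem?_getD, List.getElem?_set]
  by_cases h1 : i = k
  · subst h1
    by_cases h2 : i < l.length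
    · simp [h2]
    · simp [h2, List.getElem?_eq_none (le_of_not_gt h2)]
  · simp [h1]

theorem pv_getD_replicate0 (n k : Nat) : (List.replicate n (0 : Nat)).getD k 0 = 0 := by
  by_cases h : k < n
  · exact List.getD_replicate 0 h
  · simp [List.getD_eq_getElem?_getD, h]

theorem pv_getD_take (l : List Char) (n m : Nat) (d : Char) (h : m < n) :
    (l.take n).getD m d = l.getD m d := by
  simp [List.getD_eq_getElem?_getD, List.getElem?_take, h]

-- bound on the helper's accumulated length
theorem pv_foldSnd_le (w : List Char) :
    ∀ (l : List Nat) (st : Nat × Nat), ((l.foldl (pvHelpAStep w) st).2) ≤ st.2 + l.length := by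
  intro l
  induction l with
  | nil => intro st; simp
  | cons x xs ih =>
    intro st
    simp only [List.foldl_cons, List.length_cons]
    by_cases h : w.getD st.1 ' ' = w.getD x ' '
    · have := ih (st.1 + 1, st.2 + 1)
      simp only [pvHelpAStep, h, if_pos] at *
      omega
    · have := ih (0, 0)
      simp only [pvHelpAStep, h, if_neg, not_false_iff] at *
      omega

theorem pvHelpA_le (w : List Char) : pvHelpA w ≤ w.length - 1 := by
  have := pv_foldSnd_le w (List.range' 1 (w.length - 1)) (0, 0)
  simpa [pvHelpA] using this

theorem pv_set_fold_le (v : Nat → Nat) (hv : ∀ i, v i ≤ i) :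
    ∀ (l : List Nat) (acc : List Nat), (∀ k, acc.getD k 0 ≤ k) →
      ∀ k, (l.foldl (fun a i => a.set i (v i)) acc).getD k 0 ≤ k := by
  intro l
  induction l with
  | nil => intro acc h k; simpa using h k
  | cons x xs ih =>
    intro acc h k
    simp only [List.foldl_cons]
    apply ih
    intro k'
    rw [pv_getD_set]
    split_ifs with h'
    · exact h'.1 ▸ hv x
    · exact h k'

-- A's table values never exceed their index
theorem pvComputePrefixA_le (p : List Char) : ∀ k, (pvComputePrefixA p).getD k 0 ≤ k := by
  have hv : ∀ i, pvHelpA (p.take (i + 1)) ≤ i := by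
    intro i
    have h1 := pvHelpA_le (p.take (i + 1))
    have h2 : (p.take (i + 1)).length ≤ i + 1 := by
      simp [List.length_take]
    omega
  exact pv_set_fold_le _ hv _ _ (fun k => by rw [pv_getD_replicate0]; exact Nat.zero_le k)

theorem pv_prefB_fold_le (p : List Char) :
    ∀ (t a : Nat) (acc : List Nat) (r : Nat), r < a → (∀ k, acc.getD k 0 ≤ k) →
      ∀ k, (((List.range' a t).foldl (pvPrefBStep p) (acc, r)).1).getD k 0 ≤ k := by
  intro t
  induction t with
  | zero => intro a acc r _ h k; simpa using h k
  | succ t ih =>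
    intro a acc r hr h k
    rw [List.range'_succ]
    simp only [List.foldl_cons]
    have hrun : (if p.getD r ' ' = p.getD a ' ' then r + 1 else 0) ≤ a := by
      split_ifs <;> omega
    have hstep : pvPrefBStep p (acc, r) a =
        (acc.set a (if p.getD r ' ' = p.getD a ' ' then r + 1 else 0),
         (if p.getD r ' ' = p.getD a ' ' then r + 1 else 0)) := rfl
    rw [hstep]
    exact ih (a + 1) (acc.set a (if p.getD r ' ' = p.getD a ' ' then r + 1 else 0))
      (if p.getD r ' ' = p.getD a ' ' then r + 1 else 0) (by omega)
      (fun k' => by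
        rw [pv_getD_set]
        by_cases h' : a = k' ∧ a < acc.length
        · rw [if_pos h']; exact h'.1 ▸ hrun
        · rw [if_neg h']; exact h k') k

-- B's table values never exceed their index
theorem pvPrefB_le (p : List Char) : ∀ k, (pvPrefB p).getD k 0 ≤ k := by
  intro k
  unfold pvPrefB
  exact pv_prefB_fold_le p _ 1 _ 0 (by omega) (fun k => by rw [pv_getD_replicate0]; exact Nat.zero_le k) k

-- the shared run-state specification of both prefix tables
def pvRunSt (p : List Char) : Nat → Nat
  | 0 => 0
  | j + 1 => if p.getD (pvRunSt p j) ' ' = p.getD (j + 1) ' ' then pvRunSt p j + 1 else 0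

theorem pvRunSt_le (p : List Char) : ∀ j, pvRunSt p j ≤ j := by
  intro j
  induction j with
  | zero => simp [pvRunSt]
  | succ j ih => rw [pvRunSt]; split_ifs <;> omega

theorem pv_helpA_fold (w : List Char) :
    ∀ t, (List.range' 1 t).foldl (pvHelpAStep w) (0, 0) = (pvRunSt w t, pvRunSt w t) := by
  intro t
  induction t with
  | zero => simp [pvRunSt]
  | succ t ih =>
    rw [List.range'_concat, List.foldl_append, ih]
    simp only [List.foldl_cons, List.foldl_nil, pvHelpAStep]
    have h1 : 1 + 1 * t = t + 1 := by omega
    rw [h1, pvRunSt]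
    split_ifs <;> rfl

theorem pv_runSt_take (p : List Char) (i : Nat) :
    ∀ j, j ≤ i → pvRunSt (p.take (i + 1)) j = pvRunSt p j := by
  intro j
  induction j with
  | zero => intro _; rfl
  | succ j ih =>
    intro hj
    have hj' : j ≤ i := by omega
    rw [pvRunSt, pvRunSt, ih hj']
    rw [pv_getD_take p (i + 1) (pvRunSt p j) ' ' (by have := pvRunSt_le p j; omega)]
    rw [pv_getD_take p (i + 1) (j + 1) ' ' (by omega)]

theorem pvHelpA_runSt (p : List Char) (i : Nat) (h : i + 1 ≤ p.length) :
    pvHelpA (p.take (i + 1)) = pvRunSt p i := by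
  have hlen : (p.take (i + 1)).length = i + 1 := by simp [List.length_take]; omega
  rw [pvHelpA, hlen]
  have : i + 1 - 1 = i := by omega
  rw [this, pv_helpA_fold, pv_runSt_take p i i (le_refl i)]

theorem pv_set_fold_len (v : Nat → Nat) :
    ∀ (l : List Nat) (acc : List Nat),
      (l.foldl (fun a i => a.set i (v i)) acc).length = acc.length := by
  intro l
  induction l with
  | nil => intro acc; rfl
  | cons x xs ih => intro acc; simp [List.foldl_cons, ih, List.length_set]

theorem pv_tableA (p : List Char) :
    ∀ t, t ≤ p.length - 1 → ∀ k,
      ((List.range' 1 t).foldl (fun acc i => acc.set i (pvHelpA (p.take (i + 1))))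
        (List.replicate p.length 0)).getD k 0 = if 1 ≤ k ∧ k ≤ t then pvRunSt p k else 0 := by
  intro t
  induction t with
  | zero =>
    intro _ k
    simp only [List.range'_zero, List.foldl_nil]
    rw [pv_getD_replicate0]
    have : ¬ (1 ≤ k ∧ k ≤ 0) := by omega
    rw [if_neg this]
  | succ t ih =>
    intro ht k
    rw [List.range'_concat, List.foldl_append]
    simp only [List.foldl_cons, List.foldl_nil]
    have h1 : 1 + 1 * t = t + 1 := by omega
    rw [h1, pv_getD_set, pv_set_fold_len]
    have hm : t + 2 ≤ p.length := by omega
    rw [pvHelpA_runSt p (t + 1) (by omega)]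
    by_cases hk : t + 1 = k
    · subst hk
      have hcond : t + 1 = t + 1 ∧ t + 1 < (List.replicate p.length (0:Nat)).length :=
        ⟨rfl, by rw [List.length_replicate]; omega⟩
      rw [if_pos hcond, if_pos (show 1 ≤ t + 1 ∧ t + 1 ≤ t + 1 by omega)]
    · have hcond : ¬ (t + 1 = k ∧ t + 1 < (List.replicate p.length (0:Nat)).length) := by
        intro hh; exact hk hh.1
      rw [if_neg hcond, ih (by omega) k]
      by_cases h2 : 1 ≤ k ∧ k ≤ t
      · have h3 : 1 ≤ k ∧ k ≤ t + 1 := by omega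
        simp [h2, h3]
      · have h3 : ¬ (1 ≤ k ∧ k ≤ t + 1) := by omega
        simp [h2, h3]

theorem pv_tableB (p : List Char) :
    ∀ t, t ≤ p.length - 1 →
      ((List.range' 1 t).foldl (pvPrefBStep p) (List.replicate p.length 0, 0)).2 = pvRunSt p t ∧
      ((List.range' 1 t).foldl (pvPrefBStep p) (List.replicate p.length 0, 0)).1.length = p.length ∧
      ∀ k, ((List.range' 1 t).foldl (pvPrefBStep p) (List.replicate p.length 0, 0)).1.getD k 0 =
        if 1 ≤ k ∧ k ≤ t then pvRunSt p k else 0 := by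
  intro t
  induction t with
  | zero =>
    intro _
    simp only [List.range'_zero, List.foldl_nil]
    refine ⟨rfl, by simp, ?_⟩
    intro k
    rw [pv_getD_replicate0]
    have : ¬ (1 ≤ k ∧ k ≤ 0) := by omega
    rw [if_neg this]
  | succ t ih =>
    intro ht
    obtain ⟨ih2, ihlen, ih1⟩ := ih (by omega)
    rw [List.range'_concat, List.foldl_append]
    simp only [List.foldl_cons, List.foldl_nil]
    have h1 : 1 + 1 * t = t + 1 := by omega
    rw [h1]
    have hrun : (pvPrefBStep p ((List.range' 1 t).foldl (pvPrefBStep p) (List.replicate p.length 0, 0)) (t + 1)).2 = pvRunSt p (t + 1) := by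
      simp only [pvPrefBStep, ih2]
      rw [pvRunSt]
    refine ⟨hrun, ?_, ?_⟩
    · simp only [pvPrefBStep, List.length_set]; exact ihlen
    · intro k
      simp only [pvPrefBStep, ih2]
      rw [pv_getD_set, ihlen]
      by_cases hk : t + 1 = k
      · subst hk
        have hcond : t + 1 = t + 1 ∧ t + 1 < p.length := ⟨rfl, by omega⟩
        rw [if_pos hcond, if_pos (show 1 ≤ t + 1 ∧ t + 1 ≤ t + 1 by omega), pvRunSt]
      · have hcond : ¬ (t + 1 = k ∧ t + 1 < p.length) := by intro hh; exact hk hh.1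
        rw [if_neg hcond, ih1 k]
        by_cases h2 : 1 ≤ k ∧ k ≤ t
        · have h3 : 1 ≤ k ∧ k ≤ t + 1 := by omega
          simp [h2, h3]
        · have h3 : ¬ (1 ≤ k ∧ k ≤ t + 1) := by omega
          simp [h2, h3]

theorem pv_tables (p : List Char) :
    ∀ k, (pvComputePrefixA p).getD k 0 = (pvPrefB p).getD k 0 := by
  intro k
  unfold pvComputePrefixA pvPrefB
  rw [pv_tableA p (p.length - 1) (le_refl _) k, (pv_tableB p (p.length - 1) (le_refl _)).2.2 k]

-- proof-layer (well-founded) versions of the loops, and bridges from the fueled ports to them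

def pvInnerW (s p : List Char) (i j : Nat) : Nat × Nat :=
  if i < s.length ∧ j < p.length ∧ s.getD i ' ' = p.getD j ' ' then
    pvInnerW s p (i + 1) (j + 1)
  else (i, j)
termination_by s.length - i
decreasing_by omega

theorem pvInnerW_ge (s p : List Char) (i j : Nat) :
    i ≤ (pvInnerW s p i j).1 ∧ ((pvInnerW s p i j).1 = i → (pvInnerW s p i j).2 = j) := by
  fun_induction pvInnerW with
  | case1 i j h ih => exact ⟨by omega, fun hh => absurd hh (by omega)⟩
  | case2 i j h => exact ⟨le_refl _, fun _ => rfl⟩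

theorem pvInnerW_le (s p : List Char) (i j : Nat) (hj : j ≤ p.length) :
    (pvInnerW s p i j).2 ≤ p.length := by
  fun_induction pvInnerW with
  | case1 i j h ih => exact ih (by omega)
  | case2 i j h => exact hj

theorem pvInnerA_bridge (s p : List Char) :
    ∀ f i j, s.length - i ≤ f → pvInnerA s p f i j = pvInnerW s p i j := by
  intro f
  induction f with
  | zero =>
    intro i j hf
    rw [pvInnerA, pvInnerW, if_neg]
    intro hh
    omega
  | succ f ih =>
    intro i j hf
    rw [pvInnerA]
    by_cases hc : i < s.length ∧ j < p.length ∧ s.getD i ' ' = p.getD j ' '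
    · rw [if_pos hc, ih (i + 1) (j + 1) (by omega)]
      conv_rhs => rw [pvInnerW]
      rw [if_pos hc]
    · rw [if_neg hc, pvInnerW, if_neg hc]

def pvOuterW (s p : List Char) (pre : List Nat) (hpre : ∀ k, pre.getD k 0 ≤ k) (i j : Nat) : Bool :=
  if hi : i < s.length then
    if (pvInnerW s p i j).2 = p.length then true
    else if h0 : 0 < (pvInnerW s p i j).2 then
      pvOuterW s p pre hpre (pvInnerW s p i j).1 (pre.getD ((pvInnerW s p i j).2 - 1) 0)
    else pvOuterW s p pre hpre ((pvInnerW s p i j).1 + 1) (pvInnerW s p i j).2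
  else false
termination_by (s.length - i, j)
decreasing_by
  · have h := pvInnerW_ge s p i j
    rcases Nat.lt_or_ge i (pvInnerW s p i j).1 with hlt | hge
    · exact Prod.Lex.left _ _ (by omega)
    · have hi1 : (pvInnerW s p i j).1 = i := by omega
      have hj1 : (pvInnerW s p i j).2 = j := h.2 hi1
      rw [hi1]
      have := hpre ((pvInnerW s p i j).2 - 1)
      exact Prod.Lex.right _ (by omega)
  · have h := pvInnerW_ge s p i j
    exact Prod.Lex.left _ _ (by omega)

theorem pvOuterA_bridge (s p : List Char) (pre : List Nat) (hpre : ∀ k, pre.getD k 0 ≤ k) :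
    ∀ f i j, j ≤ p.length → (s.length - i) * (p.length + 1) + j + 1 ≤ f →
      pvOuterA s p pre f i j = pvOuterW s p pre hpre i j := by
  intro f
  induction f with
  | zero => intro i j _ hf; omega
  | succ f ih =>
    intro i j hj hf
    by_cases hi : i < s.length
    · rw [pvOuterA]
      simp only
      rw [pvInnerA_bridge s p (s.length - i) i j (le_refl _)]
      rw [pvOuterW, dif_pos hi]
      by_cases hm : (pvInnerW s p i j).2 = p.length
      · rw [if_pos hi, if_pos hm, if_pos hm]
      · rw [if_pos hi, if_neg hm, if_neg hm]
        have hge := pvInnerW_ge s p i j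
        have hle := pvInnerW_le s p i j hj
        have hmono : ∀ a b : Nat, a ≤ b → a * (p.length + 1) ≤ b * (p.length + 1) :=
          fun a b hab => Nat.mul_le_mul_right _ hab
        by_cases h0 : 0 < (pvInnerW s p i j).2
        · rw [if_pos h0, dif_pos h0]
          apply ih
          · have := hpre ((pvInnerW s p i j).2 - 1)
            omega
          · have hpre1 := hpre ((pvInnerW s p i j).2 - 1)
            rcases Nat.lt_or_ge i (pvInnerW s p i j).1 with hlt | hge2
            · have hstep : s.length - (pvInnerW s p i j).1 + 1 ≤ s.length - i := by omega
              have h2 := hmono _ _ hstep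
              rw [Nat.succ_mul] at h2
              omega
            · have hi1 : (pvInnerW s p i j).1 = i := by omega
              have hj1 : (pvInnerW s p i j).2 = j := hge.2 hi1
              rw [hi1]
              omega
        · rw [if_neg h0, dif_neg h0]
          apply ih
          · exact hle
          · have hstep : s.length - ((pvInnerW s p i j).1 + 1) + 1 ≤ s.length - i := by omega
            have h2 := hmono _ _ hstep
            rw [Nat.succ_mul] at h2
            omega
    · rw [pvOuterA, if_neg hi, pvOuterW, dif_neg hi]

def pvFallW (p : List Char) (pre : List Nat) (hpre : ∀ k, pre.getD k 0 ≤ k) (c : Char) (j : Nat) : Nat :=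
  if 0 < j ∧ ¬ c = p.getD j ' ' then pvFallW p pre hpre c (pre.getD (j - 1) 0)
  else j
termination_by j
decreasing_by have := hpre (j - 1); omega

theorem pvFallB_bridge (p : List Char) (pre : List Nat) (hpre : ∀ k, pre.getD k 0 ≤ k) (c : Char) :
    ∀ f j, j ≤ f → pvFallB p pre c f j = pvFallW p pre hpre c j := by
  intro f
  induction f with
  | zero =>
    intro j hj
    have hj0 : j = 0 := by omega
    subst hj0
    rw [pvFallB, pvFallW, if_neg]
    simp
  | succ f ih =>
    intro j hj
    rw [pvFallB]
    by_cases hc : 0 < j ∧ ¬ c = p.getD j ' '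
    · rw [if_pos hc, ih (pre.getD (j - 1) 0) (by have := hpre (j - 1); omega)]
      conv_rhs => rw [pvFallW]
      rw [if_pos hc]
    · rw [if_neg hc, pvFallW, if_neg hc]

def pvScanW (p : List Char) (pre : List Nat) (hpre : ∀ k, pre.getD k 0 ≤ k) :
    List Char → Nat → Bool
  | [], _ => false
  | c :: rest, j =>
    let j1 := pvFallW p pre hpre c j
    if c = p.getD j1 ' ' then
      if j1 + 1 = p.length then true else pvScanW p pre hpre rest (j1 + 1)
    else pvScanW p pre hpre rest j1

theorem pvScanB_bridge (p : List Char) (pre : List Nat) (hpre : ∀ k, pre.getD k 0 ≤ k) :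
    ∀ (l : List Char) (j : Nat), pvScanB p pre l j = pvScanW p pre hpre l j := by
  intro l
  induction l with
  | nil => intro j; rfl
  | cons c rest ih =>
    intro j
    simp only [pvScanB, pvScanW]
    rw [pvFallB_bridge p pre hpre c j j (le_refl _)]
    by_cases hc : c = p.getD (pvFallW p pre hpre c j) ' '
    · rw [if_pos hc, if_pos hc]
      by_cases hm : pvFallW p pre hpre c j + 1 = p.length
      · rw [if_pos hm, if_pos hm]
      · rw [if_neg hm, if_neg hm, ih]
    · rw [if_neg hc, if_neg hc, ih]

-- fallback loop unfoldings (for the W versions)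
theorem pvFallW_base (p : List Char) (pre : List Nat) (hpre : ∀ k, pre.getD k 0 ≤ k) (c : Char)
    (j : Nat) (h : ¬ (0 < j ∧ ¬ c = p.getD j ' ')) : pvFallW p pre hpre c j = j := by
  rw [pvFallW, if_neg h]

theorem pvFallW_step (p : List Char) (pre : List Nat) (hpre : ∀ k, pre.getD k 0 ≤ k) (c : Char)
    (j : Nat) (h0 : 0 < j) (hc : ¬ c = p.getD j ' ') :
    pvFallW p pre hpre c j = pvFallW p pre hpre c (pre.getD (j - 1) 0) := by
  rw [pvFallW, if_pos ⟨h0, hc⟩]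

theorem pvScanW_fall (p : List Char) (pre : List Nat) (hpre : ∀ k, pre.getD k 0 ≤ k) (c : Char)
    (rest : List Char) (j : Nat) (h0 : 0 < j) (hc : ¬ c = p.getD j ' ') :
    pvScanW p pre hpre (c :: rest) j = pvScanW p pre hpre (c :: rest) (pre.getD (j - 1) 0) := by
  simp only [pvScanW]
  rw [pvFallW_step p pre hpre c j h0 hc]

-- one-step characterisation of A's outer loop (W version)
theorem pvOuterW_step (s p : List Char) (pre : List Nat) (hpre : ∀ k, pre.getD k 0 ≤ k)
    (i j : Nat) (hi : i < s.length) (hj : j < p.length) :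
    pvOuterW s p pre hpre i j =
      if s.getD i ' ' = p.getD j ' ' then
        (if j + 1 = p.length then true else pvOuterW s p pre hpre (i + 1) (j + 1))
      else if 0 < j then pvOuterW s p pre hpre i (pre.getD (j - 1) 0)
      else pvOuterW s p pre hpre (i + 1) j := by
  by_cases hc : s.getD i ' ' = p.getD j ' '
  · have hin : pvInnerW s p i j = pvInnerW s p (i + 1) (j + 1) := by
      conv_lhs => rw [pvInnerW]
      rw [if_pos ⟨hi, hj, hc⟩]
    rw [if_pos hc]
    by_cases hm : j + 1 = p.length
    · have hin2 : pvInnerW s p (i + 1) (j + 1) = (i + 1, j + 1) := by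
        rw [pvInnerW, if_neg]
        intro hh
        omega
      rw [pvOuterW, dif_pos hi, hin, hin2, if_pos hm, if_pos hm]
    · rw [if_neg hm]
      by_cases hi2 : i + 1 < s.length
      · conv_rhs => rw [pvOuterW, dif_pos hi2]
        rw [pvOuterW, dif_pos hi, hin]
      · have hin2 : pvInnerW s p (i + 1) (j + 1) = (i + 1, j + 1) := by
          rw [pvInnerW, if_neg]
          intro hh
          exact hi2 hh.1
        rw [pvOuterW, dif_pos hi, hin, hin2]
        simp only [if_neg hm]
        have h0 : 0 < (i + 1, j + 1).2 := by omega
        rw [dif_pos h0]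
        conv_rhs => rw [pvOuterW, dif_neg hi2]
        rw [pvOuterW, dif_neg hi2]
  · have hin : pvInnerW s p i j = (i, j) := by
      rw [pvInnerW, if_neg]
      intro hh
      exact hc hh.2.2
    rw [if_neg hc, pvOuterW, dif_pos hi, hin]
    have hm : ¬ (i, j).2 = p.length := by simp; omega
    rw [if_neg hm]
    by_cases h0 : 0 < j
    · rw [dif_pos h0, if_pos h0]
    · rw [dif_neg h0, if_neg h0]

-- main equivalence of the two scans, for pointwise-equal tables
theorem pv_main (s p : List Char) (preA preB : List Nat)
    (hA : ∀ k, preA.getD k 0 ≤ k) (hB : ∀ k, preB.getD k 0 ≤ k)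
    (heq : ∀ k, preA.getD k 0 = preB.getD k 0) :
    ∀ i j, j < p.length →
      pvOuterW s p preA hA i j = pvScanW p preB hB (s.drop i) j := by
  suffices H : ∀ N i j, (s.length - i) * p.length + j ≤ N → j < p.length →
      pvOuterW s p preA hA i j = pvScanW p preB hB (s.drop i) j by
    intro i j hj
    exact H ((s.length - i) * p.length + j) i j (le_refl _) hj
  intro N
  induction N with
  | zero =>
    intro i j hmu hj
    have hm1 : 1 ≤ p.length := by omega
    have hni : s.length ≤ i := by
      by_contra hh
      have : 1 ≤ s.length - i := by omega
      nlinarith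
    have hdrop : s.drop i = [] := List.drop_eq_nil_iff.mpr hni
    rw [pvOuterW, dif_neg (by omega), hdrop]
    rfl
  | succ N ihN =>
    intro i j hmu hj
    by_cases hi : i < s.length
    · have hdrop : s[i] :: s.drop (i + 1) = s.drop i := List.getElem_cons_drop (by omega)
      have hgd : s.getD i ' ' = s[i] := List.getD_eq_getElem s ' ' (by omega)
      have hmul : (s.length - i) * p.length = (s.length - (i + 1)) * p.length + p.length := by
        have h1 : s.length - i = (s.length - (i + 1)) + 1 := by omega
        rw [h1, Nat.succ_mul]
      rw [pvOuterW_step s p preA hA i j hi hj, ← hdrop]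
      by_cases hc : s[i] = p.getD j ' '
      · rw [if_pos (hgd ▸ hc)]
        simp only [pvScanW]
        have hfall : pvFallW p preB hB s[i] j = j :=
          pvFallW_base p preB hB s[i] j (by simp [hc])
        rw [hfall, if_pos hc]
        by_cases hm : j + 1 = p.length
        · rw [if_pos hm, if_pos hm]
        · rw [if_neg hm, if_neg hm]
          exact ihN (i + 1) (j + 1) (by omega) (by omega)
      · rw [if_neg (fun hh => hc (hgd ▸ hh))]
        by_cases h0 : 0 < j
        · rw [if_pos h0, heq (j - 1)]
          have hj' : preB.getD (j - 1) 0 < p.length := by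
            have := hB (j - 1); omega
          have step := ihN i (preB.getD (j - 1) 0)
            (by have := hB (j - 1); omega) hj'
          rw [← hdrop] at step
          rw [step]
          exact (pvScanW_fall p preB hB s[i] (s.drop (i + 1)) j h0 hc).symm
        · rw [if_neg h0]
          have hj0 : j = 0 := by omega
          subst hj0
          simp only [pvScanW]
          have hfall : pvFallW p preB hB s[i] 0 = 0 :=
            pvFallW_base p preB hB s[i] 0 (by simp)
          rw [hfall, if_neg hc]
          exact ihN (i + 1) 0 (by omega) (by omega)
    · have hdrop : s.drop i = [] := List.drop_eq_nil_iff.mpr (by omega)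
      rw [pvOuterW, dif_neg hi, hdrop]
      rfl

theorem pv_fuel_ok (n m : Nat) : n * (m + 1) + 0 + 1 ≤ (n + 1) * (m + 1) := by
  rw [Nat.succ_mul]
  omega

theorem pv_A_eq_W (string substring : String) :
    knuthMorrisPrattAlgorithm string substring =
      pvOuterW string.toList substring.toList (pvComputePrefixA substring.toList)
        (pvComputePrefixA_le substring.toList) 0 0 := by
  unfold knuthMorrisPrattAlgorithm
  exact pvOuterA_bridge string.toList substring.toList (pvComputePrefixA substring.toList)
    (pvComputePrefixA_le substring.toList) _ 0 0 (Nat.zero_le _)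
    (by simpa using pv_fuel_ok string.toList.length substring.toList.length)

theorem pv_A_empty_false : knuthMorrisPrattAlgorithm "" "" = false := by
  rfl

theorem pv_B_empty_true : knuthMorrisPrattAlgorithm_alt "" "" = true := by
  rfl

-- ===== VERDICT (by name: the statement is the Claim_ definition above) =====
theorem knuthMorrisPrattAlgorithm_spec : Claim_unchanged_knuthMorrisPrattAlgorithm := by
  intro str sub hdom
  unfold Spec_knuthMorrisPrattAlgorithm
  intro hnD
  rw [pv_A_eq_W]
  unfold knuthMorrisPrattAlgorithm_alt
  by_cases hp : sub.toList.isEmpty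
  · rw [if_pos hp]
    have hsub : sub = "" := String.toList_eq_nil_iff.mp (List.isEmpty_iff.mp hp)
    have hstr : ¬ str = "" := fun hh => hnD ⟨hh, hsub⟩
    have hs : str.toList ≠ [] := fun hh => hstr (String.toList_eq_nil_iff.mp hh)
    have hlen : 0 < str.toList.length := List.length_pos_iff.mpr hs
    rw [pvOuterW, dif_pos hlen]
    have hin : pvInnerW str.toList sub.toList 0 0 = (0, 0) := by
      rw [pvInnerW, if_neg]
      intro hh
      rw [List.isEmpty_iff.mp hp] at hh
      simp at hh
    rw [hin]
    have : (0, 0).2 = sub.toList.length := by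
      rw [List.isEmpty_iff.mp hp]; rfl
    rw [if_pos this]
  · rw [if_neg hp]
    have hne : sub.toList ≠ [] := fun hh => hp (List.isEmpty_iff.mpr hh)
    have hm : 0 < sub.toList.length := List.length_pos_iff.mpr hne
    rw [pvScanB_bridge sub.toList (pvPrefB sub.toList) (pvPrefB_le sub.toList) str.toList 0]
    have := pv_main str.toList sub.toList
      (pvComputePrefixA sub.toList) (pvPrefB sub.toList)
      (pvComputePrefixA_le sub.toList) (pvPrefB_le sub.toList)
      (pv_tables sub.toList) 0 0 hm
    simpa using this

theorem knuthMorrisPrattAlgorithm_changed : Claim_changed_knuthMorrisPrattAlgorithm := by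
  unfold Claim_changed_knuthMorrisPrattAlgorithm
  refine ⟨by decide, by decide, pv_A_empty_false, pv_B_empty_true, by decide⟩

theorem knuthMorrisPrattAlgorithm_tight : Claim_exact_knuthMorrisPrattAlgorithm := by
  intro str sub _ hD
  obtain ⟨h1, h2⟩ := hD
  subst h1; subst h2
  rw [pv_A_empty_false, pv_B_empty_true]
  simp
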